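-- pv_equiv track=rewrite | github.com/openai/parameter-golf | HDC_Core_Model/Templates_Tools/grid_templates.py | align_to_corner
-- ===== SOURCE A (Python) =====
-- from typing import List, Dict, Tuple, Optional, Any, Callable
-- from copy import deepcopy
--
-- Grid = List[List[int]]
--
-- def translate_grid(grid: Grid, dy: int, dx: int, wrap: bool = False) -> Grid:
--     """
--     Translate entire grid contents by (dy, dx).
--
--     Args:
--         grid: Input grid
--         dy: Vertical shift (positive = down)
--         dx: Horizontal shift (positive = right)
--         wrap: If True, wrap around edges; if False, cells shift out are lost
--
--     Returns:
--         Translated grid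
--     """
--     if not grid or not grid[0]:
--         return grid
--
--     height, width = len(grid), len(grid[0])
--     result = [[0] * width for _ in range(height)]
--
--     for y in range(height):
--         for x in range(width):
--             if grid[y][x] != 0:
--                 new_y = y + dy
--                 new_x = x + dx
--
--                 if wrap:
--                     new_y = new_y % height
--                     new_x = new_x % width
--
--                 if 0 <= new_y < height and 0 <= new_x < width:
--                     result[new_y][new_x] = grid[y][x]
--
--     return result
--
-- def align_to_corner(grid: Grid, corner: str = 'top_left') -> Grid:
--     """
--     Align object(s) to a specific corner.
--
--     Args:
--         corner: 'top_left', 'top_right', 'bottom_left', 'bottom_right'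
--     """
--     if not grid or not grid[0]:
--         return grid
--
--     height, width = len(grid), len(grid[0])
--
--     # Find bounding box
--     min_y, min_x = height, width
--     max_y, max_x = 0, 0
--
--     for y in range(height):
--         for x in range(width):
--             if grid[y][x] != 0:
--                 min_y = min(min_y, y)
--                 max_y = max(max_y, y)
--                 min_x = min(min_x, x)
--                 max_x = max(max_x, x)
--
--     if min_y > max_y:
--         return deepcopy(grid)
--
--     # Calculate translation based on corner
--     if corner == 'top_left':
--         dy, dx = -min_y, -min_x
--     elif corner == 'top_right':
--         dy, dx = -min_y, (width - 1 - max_x)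
--     elif corner == 'bottom_left':
--         dy, dx = (height - 1 - max_y), -min_x
--     elif corner == 'bottom_right':
--         dy, dx = (height - 1 - max_y), (width - 1 - max_x)
--     else:
--         return deepcopy(grid)
--
--     return translate_grid(grid, dy, dx)
-- ===== SOURCE B (Python) =====
-- def align_to_corner(grid, corner='top_left'):
--     """
--     Align object(s) to a specific corner.
--
--     Args:
--         corner: 'top_left', 'top_right', 'bottom_left', 'bottom_right'
--     """
--     if not grid or not grid[0]:
--         return grid
--
--     height, width = len(grid), len(grid[0])
--
--     # Find bounding box of nonzero cells
--     min_y, min_x = height, width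
--     max_y, max_x = 0, 0
--     for y in range(height):
--         for x in range(width):
--             if grid[y][x] != 0:
--                 min_y = min(min_y, y)
--                 max_y = max(max_y, y)
--                 min_x = min(min_x, x)
--                 max_x = max(max_x, x)
--
--     if min_y > max_y:  # all-zero grid
--         return [row[:] for row in grid]
--
--     bh, bw = max_y - min_y + 1, max_x - min_x + 1
--     offsets = {'top_left': (0, 0),
--                'top_right': (0, width - bw),
--                'bottom_left': (height - bh, 0),
--                'bottom_right': (height - bh, width - bw)}
--     if corner not in offsets:
--         return [row[:] for row in grid]
--     oy, ox = offsets[corner]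
--
--     # Build the result row by row: crop the bounding box and pad with zeros
--     out = []
--     for i in range(height):
--         if oy <= i < oy + bh:
--             row = grid[min_y + i - oy]
--             out.append([0] * ox + row[min_x:max_x + 1] + [0] * (width - ox - bw))
--         else:
--             out.append([0] * width)
--     return out
-- ===== Notes on version B (the rewrite author's own statement) =====
-- stated objective: simpler
-- what changed: Instead of translating the whole grid cell-by-cell into a mutated zero grid (translate_grid with per-cell bounds checks), B crops the bounding-box block and builds each output row directly as zero-padding ++ cropped slice ++ zero-padding at the corner's offset.
import Mathlib
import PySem

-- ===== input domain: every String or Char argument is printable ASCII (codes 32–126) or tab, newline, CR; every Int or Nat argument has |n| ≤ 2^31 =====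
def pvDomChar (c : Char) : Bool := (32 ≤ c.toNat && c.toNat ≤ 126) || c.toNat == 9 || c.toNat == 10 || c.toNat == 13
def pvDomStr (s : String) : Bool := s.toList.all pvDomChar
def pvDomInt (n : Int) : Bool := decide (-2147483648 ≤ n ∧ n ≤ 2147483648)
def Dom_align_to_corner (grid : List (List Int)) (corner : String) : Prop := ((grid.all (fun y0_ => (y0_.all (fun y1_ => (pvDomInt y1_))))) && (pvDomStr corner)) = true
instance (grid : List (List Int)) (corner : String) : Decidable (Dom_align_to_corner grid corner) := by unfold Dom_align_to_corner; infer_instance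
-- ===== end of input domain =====

-- ===== PORT A =====
-- B rebuilds the output by cropping the bounding box and concatenating padded rows instead of
-- translating cell-by-cell into a mutated zero grid (objective: simpler).  Equivalence is about
-- return values; neither function mutates its argument (A's deepcopy(grid) is value-equal to grid).

-- grid[y][x]; exact wherever the Python does not raise (Pre_ keeps every used index in range)
def pvCell (grid : List (List Int)) (y x : Int) : Int :=
  PySem.List.pyGetD (PySem.List.pyGetD grid y []) x 0

-- the nonzero-bounding-box scan; this loop appears verbatim in BOTH Python sources
-- (state order: (min_y, max_y, min_x, max_x), initialised (height, 0, width, 0))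
def pvBBox (grid : List (List Int)) (height width : Int) : Int × Int × Int × Int :=
  (PySem.List.pyRange 0 height 1).foldl (fun s y =>
    (PySem.List.pyRange 0 width 1).foldl (fun s x =>
      if pvCell grid y x ≠ 0 then
        (min s.1 y, max s.2.1 y, min s.2.2.1 x, max s.2.2.2 x)
      else s) s) (height, 0, width, 0)

def translate_grid (grid : List (List Int)) (dy dx : Int) (wrap : Bool) : List (List Int) :=
  if grid = [] ∨ grid.headD [] = [] then grid
  else
    let height : Int := grid.length
    let width : Int := (grid.headD []).length
    let result : List (List Int) :=
      (PySem.List.pyRange 0 height 1).map (fun _ => (PySem.List.pyRange 0 width 1).map (fun _ => (0 : Int)))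
    (PySem.List.pyRange 0 height 1).foldl (fun result y =>
      (PySem.List.pyRange 0 width 1).foldl (fun result x =>
        if pvCell grid y x ≠ 0 then
          let ny0 := y + dy
          let nx0 := x + dx
          let ny := if wrap then PySem.Int.mod ny0 height else ny0
          let nx := if wrap then PySem.Int.mod nx0 width else nx0
          if 0 ≤ ny ∧ ny < height ∧ 0 ≤ nx ∧ nx < width then
            PySem.List.pySetD result ny
              (PySem.List.pySetD (PySem.List.pyGetD result ny []) nx (pvCell grid y x))
          else result
        else result) result) result

def align_to_corner (grid : List (List Int)) (corner : String) : List (List Int) :=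
  if grid = [] ∨ grid.headD [] = [] then grid
  else
    let height : Int := grid.length
    let width : Int := (grid.headD []).length
    let bb := pvBBox grid height width
    if bb.1 > bb.2.1 then grid            -- deepcopy(grid): value-equal to grid
    else if corner = "top_left" then translate_grid grid (-bb.1) (-bb.2.2.1) false
    else if corner = "top_right" then translate_grid grid (-bb.1) (width - 1 - bb.2.2.2) false
    else if corner = "bottom_left" then translate_grid grid (height - 1 - bb.2.1) (-bb.2.2.1) false
    else if corner = "bottom_right" then
      translate_grid grid (height - 1 - bb.2.1) (width - 1 - bb.2.2.2) false
    else grid                             -- deepcopy(grid): value-equal to grid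

-- ===== PORT B =====
def align_to_corner_alt (grid : List (List Int)) (corner : String) : List (List Int) :=
  if grid = [] ∨ grid.headD [] = [] then grid
  else
    let height : Int := grid.length
    let width : Int := (grid.headD []).length
    let bb := pvBBox grid height width    -- same bounding-box scan as A (kept on purpose)
    if bb.1 > bb.2.1 then grid.map (fun row => PySem.List.slice row none none)  -- [row[:] for row in grid]
    else
      let bh := bb.2.1 - bb.1 + 1
      let bw := bb.2.2.2 - bb.2.2.1 + 1
      let offsets : PySem.Dict String (Int × Int) :=
        ((((PySem.Dict.empty).insert "top_left" (0, 0)).insert "top_right" (0, width - bw)).insert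
          "bottom_left" (height - bh, 0)).insert "bottom_right" (height - bh, width - bw)
      match offsets.get? corner with
      | none => grid.map (fun row => PySem.List.slice row none none)            -- [row[:] for row in grid]
      | some (oy, ox) =>
        (PySem.List.pyRange 0 height 1).foldl (fun out i =>
          out ++ [if oy ≤ i ∧ i < oy + bh then
                    PySem.List.pyRepeat [(0 : Int)] ox
                      ++ PySem.List.slice (PySem.List.pyGetD grid (bb.1 + i - oy) [])
                          (some bb.2.2.1) (some (bb.2.2.2 + 1))
                      ++ PySem.List.pyRepeat [(0 : Int)] (width - ox - bw)
                  else PySem.List.pyRepeat [(0 : Int)] width]) []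

-- ===== PRECONDITION & SPEC =====
-- Pre_ excludes exactly the ragged grids on which both Pythons raise IndexError
-- (some row shorter than the first row, scanned with width = len(grid[0])).
def Pre_align_to_corner (grid : List (List Int)) (corner : String) : Prop :=
  ∀ row ∈ grid, (grid.headD []).length ≤ row.length
instance (grid : List (List Int)) (corner : String) : Decidable (Pre_align_to_corner grid corner) := by
  unfold Pre_align_to_corner; infer_instance

def pvWitness_align_to_corner : List (List Int) × String := ([[0, 1], [2, 0]], "top_right")

def Spec_align_to_corner (grid : List (List Int)) (corner : String) (out : List (List Int)) : Prop :=
  out = align_to_corner_alt grid corner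
instance (grid : List (List Int)) (corner : String) (out : List (List Int)) :
    Decidable (Spec_align_to_corner grid corner out) := by unfold Spec_align_to_corner; infer_instance

-- ===== CLAIM (what is proved, stated in full; the proofs are below) =====
def Claim_equal_align_to_corner : Prop := ∀ (grid : List (List Int)) (corner : String), Dom_align_to_corner grid corner → Pre_align_to_corner grid corner → Spec_align_to_corner grid corner (align_to_corner grid corner)

-- ===== LEMMAS AND PROOFS =====

def bbCont (s : Int × Int × Int × Int) (y x : Int) : Prop :=
  s.1 ≤ y ∧ y ≤ s.2.1 ∧ s.2.2.1 ≤ x ∧ x ≤ s.2.2.2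

def bbLe (s t : Int × Int × Int × Int) : Prop :=
  t.1 ≤ s.1 ∧ s.2.1 ≤ t.2.1 ∧ t.2.2.1 ≤ s.2.2.1 ∧ s.2.2.2 ≤ t.2.2.2

theorem bbLe_refl (s : Int × Int × Int × Int) : bbLe s s := by unfold bbLe; omega

theorem bbLe_trans {s t u : Int × Int × Int × Int} (h1 : bbLe s t) (h2 : bbLe t u) : bbLe s u := by
  unfold bbLe at *; omega

theorem bbCont_mono {s t : Int × Int × Int × Int} {y x : Int} (h : bbCont s y x) (hle : bbLe s t) :
    bbCont t y x := by unfold bbCont bbLe at *; omega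

theorem bbS_le (grid : List (List Int)) (s : Int × Int × Int × Int) (y x : Int) :
    bbLe s (if pvCell grid y x ≠ 0 then
      (min s.1 y, max s.2.1 y, min s.2.2.1 x, max s.2.2.2 x) else s) := by
  unfold bbLe; split <;> simp

theorem pv_foldl_le {α : Type} (g : (Int × Int × Int × Int) → α → (Int × Int × Int × Int))
    (h : ∀ s a, bbLe s (g s a)) (l : List α) : ∀ s, bbLe s (l.foldl g s) := by
  induction l with
  | nil => intro s; exact bbLe_refl s
  | cons a l ih => intro s; exact bbLe_trans (h s a) (ih (g s a))

theorem pv_foldl_pres {α σ : Type} (Q : σ → Prop) (g : σ → α → σ) (l : List α)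
    (h : ∀ s a, a ∈ l → Q s → Q (g s a)) : ∀ s, Q s → Q (l.foldl g s) := by
  induction l with
  | nil => intro s hs; exact hs
  | cons a l ih =>
      intro s hs
      exact ih (fun s b hb hsb => h s b (List.mem_cons_of_mem a hb) hsb) (g s a)
        (h s a (List.mem_cons_self) hs)

-- inner containment: once a nonzero cell is seen, the state contains it forever
theorem bb_inner_hit (grid : List (List Int)) (y : Int) (xs : List Int) :
    ∀ (s : Int × Int × Int × Int) {x : Int}, x ∈ xs → pvCell grid y x ≠ 0 →
    bbCont (xs.foldl (fun s x => if pvCell grid y x ≠ 0 then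
      (min s.1 y, max s.2.1 y, min s.2.2.1 x, max s.2.2.2 x) else s) s) y x := by
  induction xs with
  | nil => intro s x hx; exact absurd hx (List.not_mem_nil)
  | cons a l ih =>
      intro s x hx hnz
      rcases List.mem_cons.1 hx with rfl | hmem
      · simp only [List.foldl_cons]
        refine bbCont_mono ?_ (pv_foldl_le _ (fun s a => bbS_le grid s y a) l _)
        rw [if_pos hnz]
        unfold bbCont; simp
      · exact ih _ hmem hnz

theorem bb_outer_hit (grid : List (List Int)) (w : Int) (ys : List Int) :
    ∀ (s : Int × Int × Int × Int) {y x : Int}, y ∈ ys → x ∈ PySem.List.pyRange 0 w 1 →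
    pvCell grid y x ≠ 0 →
    bbCont (ys.foldl (fun s y => (PySem.List.pyRange 0 w 1).foldl (fun s x =>
      if pvCell grid y x ≠ 0 then
        (min s.1 y, max s.2.1 y, min s.2.2.1 x, max s.2.2.2 x) else s) s) s) y x := by
  induction ys with
  | nil => intro s y x hy; exact absurd hy (List.not_mem_nil)
  | cons a l ih =>
      intro s y x hy hx hnz
      rcases List.mem_cons.1 hy with rfl | hmem
      · simp only [List.foldl_cons]
        refine bbCont_mono (bb_inner_hit grid y _ s hx hnz) ?_
        exact pv_foldl_le _ (fun s b => pv_foldl_le _ (fun t a => bbS_le grid t b a) _ s) l _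
      · exact ih _ hmem hx hnz

theorem bb_hit (grid : List (List Int)) (h w y x : Int)
    (hy : 0 ≤ y ∧ y < h) (hx : 0 ≤ x ∧ x < w) (hnz : pvCell grid y x ≠ 0) :
    bbCont (pvBBox grid h w) y x := by
  exact bb_outer_hit grid w _ _ ((PySem.List.mem_pyRange_one).2 hy)
    ((PySem.List.mem_pyRange_one).2 hx) hnz

def bbQ (h w : Int) (s : Int × Int × Int × Int) : Prop :=
  s = (h, 0, w, 0) ∨ (0 ≤ s.1 ∧ s.1 ≤ s.2.1 ∧ s.2.1 < h ∧ 0 ≤ s.2.2.1 ∧ s.2.2.1 ≤ s.2.2.2 ∧ s.2.2.2 < w)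

theorem bb_Q (grid : List (List Int)) (h w : Int) : bbQ h w (pvBBox grid h w) := by
  unfold pvBBox
  refine pv_foldl_pres (bbQ h w) _ _ ?_ _ (Or.inl rfl)
  intro s y hy hs
  have hyb := (PySem.List.mem_pyRange_one).1 hy
  refine pv_foldl_pres (bbQ h w) _ _ ?_ s hs
  intro t x hx ht
  have hxb := (PySem.List.mem_pyRange_one).1 hx
  split
  · obtain ⟨a, b, c, d⟩ := t
    unfold bbQ at ht ⊢
    simp only [Prod.mk.injEq] at ht ⊢
    rcases ht with ⟨rfl, rfl, rfl, rfl⟩ | hb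
    · right; simp; omega
    · right; simp at hb ⊢; omega
  · exact ht

-- ===== translate-side =====

def trStep (grid : List (List Int)) (dx w y : Int) (r : List Int) (x : Int) : List Int :=
  if pvCell grid y x ≠ 0 ∧ 0 ≤ x + dx ∧ x + dx < w then
    PySem.List.pySetD r (x + dx) (pvCell grid y x) else r

theorem trStep_length (grid : List (List Int)) (dx w y : Int) (r : List Int) (x : Int) :
    (trStep grid dx w y r x).length = r.length := by
  unfold trStep; split
  · exact PySem.List.length_pySetD _ _ _
  · rfl

theorem trRow_length (grid : List (List Int)) (dx w y : Int) (l : List Int) :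
    ∀ r : List Int, (l.foldl (trStep grid dx w y) r).length = r.length := by
  induction l with
  | nil => intro r; rfl
  | cons a l ih => intro r; rw [List.foldl_cons, ih, trStep_length]

theorem row_char (grid : List (List Int)) (dx w y : Int) (n : Nat) :
    ∀ (r : List Int), (r.length : Int) = w → ∀ (j : Nat), j < r.length →
    (((List.range n).map (fun (k : Nat) => (k : Int))).foldl (trStep grid dx w y) r)[j]?
      = some (if 0 ≤ (j : Int) - dx ∧ (j : Int) - dx < (n : Int) ∧ pvCell grid y ((j : Int) - dx) ≠ 0
          then pvCell grid y ((j : Int) - dx) else r.getD j 0) := by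
  induction n with
  | zero =>
      intro r hr j hj
      rw [if_neg (fun h2 => by have h1 := h2.1; have h3 := h2.2.1; push_cast at h3; omega)]
      simp [List.getElem?_eq_getElem hj, List.getD_eq_getElem r 0 hj]
  | succ n ih =>
      intro r hr j hj
      have hsnoc : (List.range (n+1)).map (fun (k : Nat) => (k : Int)) = (List.range n).map (fun (k : Nat) => (k : Int)) ++ [(n:Int)] := by
        rw [List.range_succ]; simp
      rw [hsnoc, List.foldl_append]
      have hih := ih r hr j hj
      have hrnlen : (((List.range n).map (fun (k : Nat) => (k : Int))).foldl (trStep grid dx w y) r).length = r.length :=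
        trRow_length _ _ _ _ _ _
      simp only [List.foldl_cons, List.foldl_nil]
      generalize hgen : (((List.range n).map (fun (k : Nat) => (k : Int))).foldl (trStep grid dx w y) r) = rn at hih hrnlen ⊢
      unfold trStep
      by_cases hg : pvCell grid y (n:Int) ≠ 0 ∧ 0 ≤ (n:Int) + dx ∧ (n:Int) + dx < w
      · rw [if_pos hg, PySem.List.pySetD_of_nonneg _ _ hg.2.1, List.getElem?_set]
        by_cases hje : ((n:Int) + dx).toNat = j
        · have hjdx : (j : Int) - dx = (n : Int) := by omega
          rw [if_pos hje, if_pos (by omega : ((n:Int)+dx).toNat < rn.length), hjdx]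
          rw [if_pos ⟨by omega, by push_cast; omega, hg.1⟩]
        · rw [if_neg hje, hih]
          have hne : (j : Int) - dx ≠ (n : Int) := by omega
          by_cases hc : 0 ≤ (j:Int) - dx ∧ (j:Int) - dx < (n:Int) ∧ pvCell grid y ((j:Int) - dx) ≠ 0
          · rw [if_pos hc, if_pos ⟨hc.1, by push_cast; omega, hc.2.2⟩]
          · rw [if_neg hc, if_neg (fun h2 => hc ⟨h2.1, by have := h2.2.1; push_cast at this; omega, h2.2.2⟩)]
      · rw [if_neg hg, hih]
        by_cases hjdx : (j : Int) - dx = (n : Int)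
        · have hin : 0 ≤ (n:Int) + dx ∧ (n:Int) + dx < w := by omega
          have hz : ¬ pvCell grid y ((j:Int) - dx) ≠ 0 := by
            rw [hjdx]; intro hnz; exact hg ⟨hnz, hin⟩
          rw [if_neg (fun h2 => hz h2.2.2), if_neg (fun h2 => hz h2.2.2)]
        · by_cases hc : 0 ≤ (j:Int) - dx ∧ (j:Int) - dx < (n:Int) ∧ pvCell grid y ((j:Int) - dx) ≠ 0
          · rw [if_pos hc, if_pos ⟨hc.1, by push_cast; omega, hc.2.2⟩]
          · rw [if_neg hc, if_neg (fun h2 => hc ⟨h2.1, by have := h2.2.1; push_cast at this; omega, h2.2.2⟩)]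

def tgStep (grid : List (List Int)) (dy dx h w : Int) (result : List (List Int)) (y x : Int) :
    List (List Int) :=
  if pvCell grid y x ≠ 0 then
    (if 0 ≤ y + dy ∧ y + dy < h ∧ 0 ≤ x + dx ∧ x + dx < w then
      PySem.List.pySetD result (y + dy)
        (PySem.List.pySetD (PySem.List.pyGetD result (y + dy) []) (x + dx) (pvCell grid y x))
    else result) else result

theorem inner_collapse (grid : List (List Int)) (dy dx h w y : Int)
    (hy : 0 ≤ y + dy ∧ y + dy < h) (xs : List Int) :
    ∀ (res : List (List Int)), (y + dy).toNat < res.length →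
    xs.foldl (fun result x => tgStep grid dy dx h w result y x) res
      = PySem.List.pySetD res (y + dy)
          (xs.foldl (trStep grid dx w y) (PySem.List.pyGetD res (y + dy) [])) := by
  induction xs with
  | nil =>
      intro res hlen
      simp only [List.foldl_nil]
      rw [PySem.List.pySetD_of_nonneg _ _ hy.1, PySem.List.pyGetD_of_nonneg _ _ hy.1,
        List.getD_eq_getElem res [] hlen, List.set_getElem_self]
  | cons x xs ih =>
      intro res hlen
      simp only [List.foldl_cons]
      by_cases hnz : pvCell grid y x ≠ 0
      · by_cases hx : 0 ≤ x + dx ∧ x + dx < w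
        · have hg : 0 ≤ y + dy ∧ y + dy < h ∧ 0 ≤ x + dx ∧ x + dx < w := ⟨hy.1, hy.2, hx⟩
          rw [show tgStep grid dy dx h w res y x = PySem.List.pySetD res (y + dy)
              (PySem.List.pySetD (PySem.List.pyGetD res (y + dy) []) (x + dx) (pvCell grid y x))
            from by unfold tgStep; rw [if_pos hnz, if_pos hg]]
          rw [ih _ (by rw [PySem.List.length_pySetD]; exact hlen)]
          rw [show trStep grid dx w y (PySem.List.pyGetD res (y + dy) []) x
              = PySem.List.pySetD (PySem.List.pyGetD res (y + dy) []) (x + dx) (pvCell grid y x)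
            from by unfold trStep; rw [if_pos ⟨hnz, hx⟩]]
          have hget : PySem.List.pyGetD (PySem.List.pySetD res (y + dy)
              (PySem.List.pySetD (PySem.List.pyGetD res (y + dy) []) (x + dx) (pvCell grid y x)))
              (y + dy) []
              = PySem.List.pySetD (PySem.List.pyGetD res (y + dy) []) (x + dx) (pvCell grid y x) := by
            rw [PySem.List.pySetD_of_nonneg _ _ hy.1, PySem.List.pyGetD_of_nonneg _ _ hy.1,
              List.getD_eq_getElem _ [] (by rw [List.length_set]; exact hlen)]
            simp [List.getElem_set]
          rw [hget, PySem.List.pySetD_of_nonneg _ _ hy.1, PySem.List.pySetD_of_nonneg _ _ hy.1,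
            List.set_set]
          rw [PySem.List.pySetD_of_nonneg _ _ hy.1]
        · rw [show tgStep grid dy dx h w res y x = res from by
              unfold tgStep; rw [if_pos hnz, if_neg (by tauto)]]
          rw [show trStep grid dx w y (PySem.List.pyGetD res (y + dy) []) x
              = PySem.List.pyGetD res (y + dy) [] from by
              unfold trStep; rw [if_neg (by tauto)]]
          exact ih res hlen
      · rw [show tgStep grid dy dx h w res y x = res from by unfold tgStep; rw [if_neg hnz]]
        rw [show trStep grid dx w y (PySem.List.pyGetD res (y + dy) []) x
            = PySem.List.pyGetD res (y + dy) [] from by unfold trStep; rw [if_neg (by tauto)]]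
        exact ih res hlen

theorem inner_skip (grid : List (List Int)) (dy dx h w y : Int)
    (hy : ¬ (0 ≤ y + dy ∧ y + dy < h)) (xs : List Int) :
    ∀ (res : List (List Int)),
    xs.foldl (fun result x => tgStep grid dy dx h w result y x) res = res := by
  induction xs with
  | nil => intro res; rfl
  | cons x xs ih =>
      intro res
      simp only [List.foldl_cons]
      rw [show tgStep grid dy dx h w res y x = res from by
        unfold tgStep; split
        · rw [if_neg (by tauto)]
        · rfl]
      exact ih res

theorem outer_char (grid : List (List Int)) (dy dx h w : Int) (n : Nat) :
    ∀ (res : List (List Int)), (res.length : Int) = h →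
    ((((List.range n).map (fun (k : Nat) => (k : Int))).foldl (fun result y =>
        (PySem.List.pyRange 0 w 1).foldl (fun result x => tgStep grid dy dx h w result y x) result)
        res).length = res.length
    ∧ ∀ (i : Nat), i < res.length →
      (((List.range n).map (fun (k : Nat) => (k : Int))).foldl (fun result y =>
        (PySem.List.pyRange 0 w 1).foldl (fun result x => tgStep grid dy dx h w result y x) result)
        res)[i]?
      = some (if 0 ≤ (i : Int) - dy ∧ (i : Int) - dy < (n : Int) then
          (PySem.List.pyRange 0 w 1).foldl (trStep grid dx w ((i : Int) - dy)) (res.getD i [])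
        else res.getD i [])) := by
  induction n with
  | zero =>
      intro res hres
      refine ⟨rfl, fun i hi => ?_⟩
      rw [if_neg (fun h2 => by have := h2.2; push_cast at this; omega)]
      simp [List.getElem?_eq_getElem hi, List.getD_eq_getElem res [] hi]
  | succ n ih =>
      intro res hres
      obtain ⟨hlen, hent⟩ := ih res hres
      have hsnoc : (List.range (n+1)).map (fun (k : Nat) => (k : Int)) = (List.range n).map (fun (k : Nat) => (k : Int)) ++ [(n:Int)] := by
        rw [List.range_succ]; simp
      rw [hsnoc, List.foldl_append]
      simp only [List.foldl_cons, List.foldl_nil]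
      generalize hgen : (((List.range n).map (fun (k : Nat) => (k : Int))).foldl (fun result y =>
        (PySem.List.pyRange 0 w 1).foldl (fun result x => tgStep grid dy dx h w result y x) result)
        res) = rn at hlen hent ⊢
      by_cases hy : 0 ≤ (n:Int) + dy ∧ (n:Int) + dy < h
      · have hi0 : ((n:Int) + dy).toNat < rn.length := by omega
        rw [inner_collapse grid dy dx h w (n:Int) hy _ rn hi0]
        have hbase : PySem.List.pyGetD rn ((n:Int) + dy) [] = res.getD (((n:Int) + dy).toNat) [] := by
          have h2 := hent (((n:Int) + dy).toNat) (by omega)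
          rw [List.getElem?_eq_getElem (by omega : ((n:Int)+dy).toNat < rn.length),
            if_neg (by omega : ¬ (0 ≤ ((((n:Int) + dy).toNat : Nat) : Int) - dy ∧ ((((n:Int) + dy).toNat : Nat) : Int) - dy < (n : Int)))] at h2
          rw [PySem.List.pyGetD_of_nonneg _ _ hy.1, List.getD_eq_getElem rn [] (by omega)]
          exact Option.some_inj.1 h2
        constructor
        · rw [PySem.List.length_pySetD]; exact hlen
        · intro i hi
          rw [PySem.List.pySetD_of_nonneg _ _ hy.1, List.getElem?_set]
          by_cases hie : ((n:Int) + dy).toNat = i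
          · rw [if_pos hie, if_pos (by omega : ((n:Int)+dy).toNat < rn.length)]
            have hidy : (i : Int) - dy = (n : Int) := by omega
            rw [if_pos (⟨by omega, by push_cast; omega⟩ : 0 ≤ (i:Int) - dy ∧ (i:Int) - dy < ((n+1 : Nat) : Int))]
            rw [hbase, hie, hidy]
          · rw [if_neg hie, hent i hi]
            have hne : (i : Int) - dy ≠ (n : Int) := by omega
            by_cases hc : 0 ≤ (i:Int) - dy ∧ (i:Int) - dy < (n:Int)
            · rw [if_pos hc, if_pos ⟨hc.1, by push_cast; omega⟩]
            · rw [if_neg hc, if_neg (fun h2 => hc ⟨h2.1, by have := h2.2; push_cast at this; omega⟩)]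
      · rw [inner_skip grid dy dx h w (n:Int) hy _ rn]
        refine ⟨hlen, fun i hi => ?_⟩
        rw [hent i hi]
        have hne : (i : Int) - dy ≠ (n : Int) := by
          intro he; exact hy ⟨by omega, by omega⟩
        by_cases hc : 0 ≤ (i:Int) - dy ∧ (i:Int) - dy < (n:Int)
        · rw [if_pos hc, if_pos ⟨hc.1, by push_cast; omega⟩]
        · rw [if_neg hc, if_neg (fun h2 => hc ⟨h2.1, by have := h2.2; push_cast at this; omega⟩)]
theorem tg_eq (grid : List (List Int)) (dy dx : Int) : translate_grid grid dy dx false =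
  if grid = [] ∨ grid.headD [] = [] then grid else
  (PySem.List.pyRange 0 (grid.length:Int) 1).foldl (fun result y =>
    (PySem.List.pyRange 0 ((grid.headD []).length:Int) 1).foldl
      (fun result x => tgStep grid dy dx (grid.length:Int) ((grid.headD []).length:Int) result y x) result)
    ((PySem.List.pyRange 0 (grid.length:Int) 1).map (fun _ => (PySem.List.pyRange 0 ((grid.headD []).length:Int) 1).map (fun _ => (0:Int)))) := rfl

theorem zrow (n : Nat) : (PySem.List.pyRange 0 (n:Int) 1).map (fun _ => (0:Int)) = List.replicate n 0 := by
  rw [PySem.List.pyRange_zero_natCast, List.map_map]; simp [Function.comp_def, List.map_const']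

theorem translate_eq_build
    (grid : List (List Int)) (hne : grid ≠ []) (hhd : grid.headD [] ≠ [])
    (hPre : ∀ row ∈ grid, (grid.headD []).length ≤ row.length)
    (my MY mx MX dy dx oy ox : Int)
    (hmy0 : 0 ≤ my) (hmyMY : my ≤ MY) (hMY : MY < (grid.length : Int))
    (hmx0 : 0 ≤ mx) (hmxMX : mx ≤ MX) (hMX : MX < ((grid.headD []).length : Int))
    (hzero : ∀ y x : Int, 0 ≤ y → y < (grid.length : Int) → 0 ≤ x → x < ((grid.headD []).length : Int) →
        (y < my ∨ MY < y ∨ x < mx ∨ MX < x) → pvCell grid y x = 0)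
    (hoy : oy = my + dy) (hox : ox = mx + dx)
    (h0y : 0 ≤ oy) (h1y : oy + (MY - my + 1) ≤ (grid.length : Int))
    (h0x : 0 ≤ ox) (h1x : ox + (MX - mx + 1) ≤ ((grid.headD []).length : Int)) :
    translate_grid grid dy dx false
      = (PySem.List.pyRange 0 (grid.length : Int) 1).foldl (fun out i =>
          out ++ [if oy ≤ i ∧ i < oy + (MY - my + 1) then
            PySem.List.pyRepeat [(0:Int)] ox
              ++ PySem.List.slice (PySem.List.pyGetD grid (my + i - oy) []) (some mx) (some (MX + 1))
              ++ PySem.List.pyRepeat [(0:Int)] (((grid.headD []).length : Int) - ox - (MX - mx + 1))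
            else PySem.List.pyRepeat [(0:Int)] ((grid.headD []).length : Int)]) [] := by
  have hh0 : 0 < grid.length := List.length_pos_iff.2 hne
  have hw0 : 0 < (grid.headD []).length := List.length_pos_iff.2 hhd
  set W : Nat := (grid.headD []).length with hWdef
  rw [tg_eq, if_neg (not_or.2 ⟨hne, hhd⟩)]
  rw [PySem.List.foldl_append_singleton_eq_map, List.nil_append]
  -- the zero grid
  have hres0 : ((PySem.List.pyRange 0 (grid.length:Int) 1).map
      (fun _ => (PySem.List.pyRange 0 (W:Int) 1).map (fun _ => (0:Int))))
      = List.replicate grid.length (List.replicate W (0:Int)) := by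
    rw [zrow, PySem.List.pyRange_zero_natCast, List.map_map]
    simp [Function.comp_def, List.map_const']
  rw [hres0]
  have hreslen : ((List.replicate grid.length (List.replicate W (0:Int))).length : Int)
      = (grid.length : Int) := by simp
  obtain ⟨hLlen, hLent⟩ := outer_char grid dy dx (grid.length : Int) (W : Int)
    grid.length (List.replicate grid.length (List.replicate W (0:Int))) hreslen
  rw [show PySem.List.pyRange 0 (grid.length : Int) 1
      = (List.range grid.length).map (fun (k : Nat) => (k : Int)) from PySem.List.pyRange_zero_natCast _]
  apply List.ext_getElem?
  intro i
  by_cases hi : i < grid.length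
  · rw [hLent i (by simp [hi]), List.getElem?_map, List.getElem?_map, List.getElem?_range hi]
    simp only [Option.map_some]
    congr 1
    have hgetD : (List.replicate grid.length (List.replicate W (0:Int))).getD i []
        = List.replicate W (0:Int) := by
      rw [List.getD_eq_getElem _ _ (by simp [hi]), List.getElem_replicate]
    rw [hgetD]
    -- now compare row i of A with row i of B
    by_cases hib : oy ≤ (i:Int) ∧ (i:Int) < oy + (MY - my + 1)
    · -- inside the pasted band
      rw [if_pos hib]
      have hsy : my + (i:Int) - oy = (i:Int) - dy := by omega
      have hsyb : my ≤ (i:Int) - dy ∧ (i:Int) - dy ≤ MY := by omega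
      have hcondA : 0 ≤ (i:Int) - dy ∧ (i:Int) - dy < (grid.length : Int) := by omega
      rw [if_pos hcondA, hsy]
      -- the source row
      have hsylt : ((i:Int) - dy).toNat < grid.length := by omega
      have hrow : PySem.List.pyGetD grid ((i:Int) - dy) [] = grid[((i:Int) - dy).toNat] := by
        rw [PySem.List.pyGetD_of_nonneg _ _ (by omega), List.getD_eq_getElem _ _ hsylt]
      have hrowlen : W ≤ grid[((i:Int) - dy).toNat].length :=
        hPre _ (List.getElem_mem hsylt)
      rw [hrow, PySem.List.slice_of_nonneg _ hmx0 (by omega) (by push_cast; omega) (by push_cast; omega),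
        PySem.List.pyRepeat_singleton, PySem.List.pyRepeat_singleton,
        PySem.List.pyRange_zero_natCast]
      apply List.ext_getElem?
      intro j
      by_cases hj : j < W
      · have hj' : j < (List.replicate W (0:Int)).length := by simpa using hj
        rw [row_char grid dx (W : Int) ((i:Int) - dy) W (List.replicate W (0:Int)) (by simp) j hj']
        rw [List.getD_eq_getElem _ _ hj', List.getElem_replicate]
        have hl1 : (List.replicate ox.toNat (0:Int)).length = ox.toNat := by simp
        have hl2 : ((grid[((i:Int) - dy).toNat].drop mx.toNat).take ((MX+1).toNat - mx.toNat)).length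
            = (MX+1).toNat - mx.toNat := by
          rw [List.length_take, List.length_drop]; omega
        by_cases hj1 : j < ox.toNat
        · have hR : ((List.replicate ox.toNat (0:Int)
              ++ (grid[((i:Int) - dy).toNat].drop mx.toNat).take ((MX+1).toNat - mx.toNat))
              ++ List.replicate ((W:Int) - ox - (MX - mx + 1)).toNat (0:Int))[j]? = some 0 := by
            rw [List.getElem?_append, if_pos (by rw [List.length_append, hl1, hl2]; omega),
              List.getElem?_append, if_pos (by rw [hl1]; omega),
              List.getElem?_replicate, if_pos hj1]
          rw [hR, if_neg (fun h2 => h2.2.2 (hzero _ _ (by omega) (by omega) h2.1 h2.2.1 (by omega)))]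
        · by_cases hj2 : j < ox.toNat + ((MX+1).toNat - mx.toNat)
          · -- inside the pasted block: both sides give the source cell
            have hlt : ((j:Int) - dx).toNat < grid[((i:Int) - dy).toNat].length := by omega
            have hR : ((List.replicate ox.toNat (0:Int)
                ++ (grid[((i:Int) - dy).toNat].drop mx.toNat).take ((MX+1).toNat - mx.toNat))
                ++ List.replicate ((W:Int) - ox - (MX - mx + 1)).toNat (0:Int))[j]?
                = grid[((i:Int) - dy).toNat][((j:Int) - dx).toNat]? := by
              rw [List.getElem?_append, if_pos (by rw [List.length_append, hl1, hl2]; omega),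
                List.getElem?_append, if_neg (by rw [hl1]; omega), hl1,
                List.getElem?_take, if_pos (by omega), List.getElem?_drop,
                show mx.toNat + (j - ox.toNat) = ((j:Int) - dx).toNat from by omega]
            rw [hR, List.getElem?_eq_getElem hlt]
            have hcell : pvCell grid ((i:Int) - dy) ((j:Int) - dx)
                = grid[((i:Int) - dy).toNat][((j:Int) - dx).toNat] := by
              unfold pvCell
              rw [hrow, PySem.List.pyGetD_of_nonneg _ _ (by omega), List.getD_eq_getElem _ _ hlt]
            by_cases hnz : pvCell grid ((i:Int) - dy) ((j:Int) - dx) ≠ 0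
            · rw [if_pos ⟨by omega, by omega, hnz⟩, hcell]
            · push_neg at hnz
              rw [if_neg (by tauto), ← hcell, hnz]
          · have hR : ((List.replicate ox.toNat (0:Int)
                ++ (grid[((i:Int) - dy).toNat].drop mx.toNat).take ((MX+1).toNat - mx.toNat))
                ++ List.replicate ((W:Int) - ox - (MX - mx + 1)).toNat (0:Int))[j]? = some 0 := by
              rw [List.getElem?_append, if_neg (by rw [List.length_append, hl1, hl2]; omega),
                List.getElem?_replicate, if_pos (by rw [List.length_append, hl1, hl2]; omega)]
            rw [hR, if_neg (fun h2 => h2.2.2 (hzero _ _ (by omega) (by omega) h2.1 h2.2.1 (by omega)))]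
      · rw [List.getElem?_eq_none (by rw [trRow_length]; simpa using hj),
          List.getElem?_eq_none (by
            rw [List.length_append, List.length_append, List.length_replicate,
              List.length_replicate, List.length_take, List.length_drop]; omega)]
    · -- outside the pasted band: B row is all zeros; A writes nothing into this row
      rw [if_neg hib, PySem.List.pyRepeat_singleton]
      by_cases hcondA : 0 ≤ (i:Int) - dy ∧ (i:Int) - dy < (grid.length : Int)
      · rw [if_pos hcondA, PySem.List.pyRange_zero_natCast]
        apply List.ext_getElem?
        intro j
        by_cases hj : j < W
        · rw [row_char grid dx (W : Int) ((i:Int) - dy) W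
              (List.replicate W 0) (by simp) j (by simpa using hj)]
          have : ¬ (0 ≤ (j:Int) - dx ∧ (j:Int) - dx < (W : Int) ∧ pvCell grid ((i:Int) - dy) ((j:Int) - dx) ≠ 0) := by
            rintro ⟨ha, hb, hc⟩
            exact hc (hzero _ _ (by omega) (by omega) ha hb (by omega))
          rw [if_neg this, List.getD_eq_getElem _ _ (by simpa using hj), List.getElem_replicate,
            List.getElem?_replicate, if_pos (show j < ((W : Int)).toNat by omega)]
        · rw [List.getElem?_eq_none (by rw [trRow_length]; simpa using hj),
            List.getElem?_eq_none (by rw [List.length_replicate]; omega)]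
      · rw [if_neg hcondA]; simp
  · rw [List.getElem?_eq_none (by rw [hLlen]; rw [List.length_replicate]; omega),
      List.getElem?_eq_none (by rw [List.length_map, List.length_map, List.length_range]; omega)]

-- ===== VERDICT (by name: the statement is the Claim_ definition above) =====
theorem align_to_corner_spec : Claim_equal_align_to_corner := by
  unfold Claim_equal_align_to_corner
  intro grid corner _hdom hpre
  unfold Spec_align_to_corner
  by_cases h1 : grid = [] ∨ grid.headD [] = []
  · unfold align_to_corner align_to_corner_alt
    rw [if_pos h1, if_pos h1]
  · have hne : grid ≠ [] := fun h => h1 (Or.inl h)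
    have hhd : grid.headD [] ≠ [] := fun h => h1 (Or.inr h)
    have hh0 : 0 < grid.length := List.length_pos_iff.2 hne
    have hw0 : 0 < (grid.headD []).length := List.length_pos_iff.2 hhd
    unfold align_to_corner align_to_corner_alt
    rw [if_neg h1, if_neg h1]
    simp only []
    rcases hbb : pvBBox grid (grid.length : Int) ((grid.headD []).length : Int) with ⟨my, MY, mx, MX⟩
    dsimp only
    by_cases h2 : my > MY
    · rw [if_pos h2, if_pos h2]
      simp [PySem.List.slice_none_none]
    · rw [if_neg h2, if_neg h2]
      have hQ := bb_Q grid (grid.length : Int) ((grid.headD []).length : Int)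
      rw [hbb] at hQ
      have hbounds : 0 ≤ my ∧ my ≤ MY ∧ MY < (grid.length : Int) ∧ 0 ≤ mx ∧ mx ≤ MX
          ∧ MX < ((grid.headD []).length : Int) := by
        unfold bbQ at hQ
        rcases hQ with heq | hb
        · simp only [Prod.mk.injEq] at heq; omega
        · simp only at hb; omega
      obtain ⟨hmy0, hmyMY, hMY, hmx0, hmxMX, hMX⟩ := hbounds
      have hzero : ∀ y x : Int, 0 ≤ y → y < (grid.length : Int) → 0 ≤ x →
          x < ((grid.headD []).length : Int) →
          (y < my ∨ MY < y ∨ x < mx ∨ MX < x) → pvCell grid y x = 0 := by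
        intro y x hy0 hyh hx0 hxw hout
        by_contra hnz
        have hh := bb_hit grid _ _ y x ⟨hy0, hyh⟩ ⟨hx0, hxw⟩ hnz
        rw [hbb] at hh
        unfold bbCont at hh
        simp only at hh
        omega
      by_cases hc1 : corner = "top_left"
      · subst hc1
        rw [if_pos rfl,
          PySem.Dict.get?_insert_of_ne _ _ (by decide), PySem.Dict.get?_insert_of_ne _ _ (by decide),
          PySem.Dict.get?_insert_of_ne _ _ (by decide), PySem.Dict.get?_insert_self]
        exact translate_eq_build grid hne hhd hpre my MY mx MX (-my) (-mx) 0 0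
          hmy0 hmyMY hMY hmx0 hmxMX hMX hzero (by omega) (by omega)
          (by omega) (by omega) (by omega) (by omega)
      · by_cases hc2 : corner = "top_right"
        · subst hc2
          rw [if_neg (by decide), if_pos rfl,
            PySem.Dict.get?_insert_of_ne _ _ (by decide), PySem.Dict.get?_insert_of_ne _ _ (by decide),
            PySem.Dict.get?_insert_self]
          exact translate_eq_build grid hne hhd hpre my MY mx MX (-my)
            (((grid.headD []).length : Int) - 1 - MX) 0
            (((grid.headD []).length : Int) - (MX - mx + 1))
            hmy0 hmyMY hMY hmx0 hmxMX hMX hzero (by omega) (by omega)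
            (by omega) (by omega) (by omega) (by omega)
        · by_cases hc3 : corner = "bottom_left"
          · subst hc3
            rw [if_neg (by decide), if_neg (by decide), if_pos rfl,
              PySem.Dict.get?_insert_of_ne _ _ (by decide), PySem.Dict.get?_insert_self]
            exact translate_eq_build grid hne hhd hpre my MY mx MX
              ((grid.length : Int) - 1 - MY) (-mx)
              ((grid.length : Int) - (MY - my + 1)) 0
              hmy0 hmyMY hMY hmx0 hmxMX hMX hzero (by omega) (by omega)
              (by omega) (by omega) (by omega) (by omega)
          · by_cases hc4 : corner = "bottom_right"
            · subst hc4
              rw [if_neg (by decide), if_neg (by decide), if_neg (by decide), if_pos rfl,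
                PySem.Dict.get?_insert_self]
              exact translate_eq_build grid hne hhd hpre my MY mx MX
                ((grid.length : Int) - 1 - MY) (((grid.headD []).length : Int) - 1 - MX)
                ((grid.length : Int) - (MY - my + 1))
                (((grid.headD []).length : Int) - (MX - mx + 1))
                hmy0 hmyMY hMY hmx0 hmxMX hMX hzero (by omega) (by omega)
                (by omega) (by omega) (by omega) (by omega)
            · rw [if_neg hc1, if_neg hc2, if_neg hc3, if_neg hc4,
                PySem.Dict.get?_insert_of_ne _ _ hc4, PySem.Dict.get?_insert_of_ne _ _ hc3,
                PySem.Dict.get?_insert_of_ne _ _ hc2, PySem.Dict.get?_insert_of_ne _ _ hc1,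
                PySem.Dict.get?_empty]
              simp [PySem.List.slice_none_none]
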